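-- pv_equiv track=rewrite | github.com/Minerstove/Python | cs11/Prac9/Prac9m.py | spread_d
-- ===== SOURCE A (Python) =====
-- def spread_d(d, grid):
--     listed_grid = list(list(row) for row in grid)
--
--     sculk_coords = set()
--     for y in range(len(listed_grid)):
--         for x in range(len(listed_grid[y])):
--             if listed_grid[y][x] == "X":
--                 sculk_coords.add((x, y))
--
--     for _ in range(d):
--         new_sculk_coords = set()
--
--         for x, y in sculk_coords:
--             for nx, ny in ((x-1,y), (x+1,y), (x,y-1), (x,y+1)):
--                 if 0 <= ny < len(listed_grid) and 0 <= nx < len(listed_grid[ny]):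
--                     if listed_grid[ny][nx] != "#" and listed_grid[ny][nx] != "X":
--                         listed_grid[ny][nx] = "X"
--                         new_sculk_coords.add((nx,ny))
--
--         sculk_coords = new_sculk_coords
--         if not sculk_coords:
--             break
--
--     return ["".join(row) for row in listed_grid]
-- ===== SOURCE B (Python) =====
-- def spread_d(d, grid):
--     # Synchronous whole-grid relaxation: instead of maintaining frontier sets,
--     # each step rebuilds the grid, turning every non-'#', non-'X' cell that has
--     # an 'X' among its four in-bounds neighbours into 'X'; stop early when a
--     # step changes nothing.
--     rows = [list(r) for r in grid]
--
--     def has_x_neighbor(y, x):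
--         row = rows[y]
--         if x > 0 and row[x - 1] == 'X':
--             return True
--         if x + 1 < len(row) and row[x + 1] == 'X':
--             return True
--         if y > 0 and x < len(rows[y - 1]) and rows[y - 1][x] == 'X':
--             return True
--         if y + 1 < len(rows) and x < len(rows[y + 1]) and rows[y + 1][x] == 'X':
--             return True
--         return False
--
--     steps = 0
--     while steps < d:
--         new_rows = [['X' if c != '#' and c != 'X' and has_x_neighbor(y, x) else c
--                      for x, c in enumerate(row)]
--                     for y, row in enumerate(rows)]
--         if new_rows == rows:
--             break
--         rows = new_rows
--         steps += 1
--
--     return [''.join(r) for r in rows]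
-- ===== Notes on version B (the rewrite author's own statement) =====
-- stated objective: alternative
-- what changed: A keeps a frontier set of sculk coordinates and mutates the grid cell-by-cell from the frontier each step; B drops the sets entirely and instead rebuilds the whole grid each step with a synchronous pass that turns every free cell with an 'X' neighbour into 'X', stopping when a pass changes nothing.
import Mathlib
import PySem

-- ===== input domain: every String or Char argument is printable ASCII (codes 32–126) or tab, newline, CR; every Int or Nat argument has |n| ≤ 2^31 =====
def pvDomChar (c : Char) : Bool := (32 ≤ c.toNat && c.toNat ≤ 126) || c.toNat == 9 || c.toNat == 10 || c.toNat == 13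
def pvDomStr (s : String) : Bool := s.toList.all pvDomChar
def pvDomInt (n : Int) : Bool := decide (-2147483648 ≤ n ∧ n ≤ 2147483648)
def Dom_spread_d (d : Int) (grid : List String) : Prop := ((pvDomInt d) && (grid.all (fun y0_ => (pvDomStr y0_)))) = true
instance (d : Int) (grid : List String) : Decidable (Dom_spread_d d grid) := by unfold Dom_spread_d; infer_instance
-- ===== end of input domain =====

-- B replaces A's per-step frontier sets by a synchronous whole-grid rebuild
-- (each step maps every cell, marking free cells with an 'X' neighbour);
-- objective: alternative decomposition, same results, no speed claim.

-- ===== PORT A =====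
-- listed_grid = list(list(row) for row in grid)
def pvRowsA (grid : List String) : List (List Char) := grid.map (fun row => row.toList)

-- the nested for-loops collecting initial 'X' coordinates into a set
def pvInitSculk (g : List (List Char)) : PySem.Set (Int × Int) :=
  (List.range g.length).foldl (fun s y =>
    (List.range (g.getD y []).length).foldl (fun s x =>
      if (g.getD y []).getD x ' ' = 'X' then PySem.Set.add s ((x : Int), (y : Int)) else s) s)
    PySem.Set.empty

-- body of the inner neighbour loop: bounds check, '#'/'X' check, mark, add
def pvProcNbr (st : List (List Char) × PySem.Set (Int × Int)) (p : Int × Int) :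
    List (List Char) × PySem.Set (Int × Int) :=
  if 0 ≤ p.2 ∧ p.2 < (st.1.length : Int) ∧ 0 ≤ p.1 ∧ p.1 < ((st.1.getD p.2.toNat []).length : Int)
      ∧ (st.1.getD p.2.toNat []).getD p.1.toNat ' ' ≠ '#'
      ∧ (st.1.getD p.2.toNat []).getD p.1.toNat ' ' ≠ 'X'
  then (st.1.set p.2.toNat ((st.1.getD p.2.toNat []).set p.1.toNat 'X'), PySem.Set.add st.2 p)
  else st

-- one iteration of the outer 'for _ in range(d)' body (up to the break test)
def pvStepA (g : List (List Char)) (s : List (Int × Int)) :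
    List (List Char) × PySem.Set (Int × Int) :=
  s.foldl (fun st a =>
      [(a.1 - 1, a.2), (a.1 + 1, a.2), (a.1, a.2 - 1), (a.1, a.2 + 1)].foldl pvProcNbr st)
    (g, PySem.Set.empty)

-- 'for _ in range(d): …  if not sculk_coords: break'
def pvLoopA : Nat → List (List Char) → PySem.Set (Int × Int) → List (List Char)
  | 0, g, _ => g
  | n + 1, g, s =>
    let r := pvStepA g s
    if r.2 = [] then r.1 else pvLoopA n r.1 r.2

def spread_d (d : Int) (grid : List String) : List String :=
  (pvLoopA d.toNat (pvRowsA grid) (pvInitSculk (pvRowsA grid))).map (fun row => String.ofList row)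

-- ===== PORT B =====
def pvRowsB (grid : List String) : List (List Char) := grid.map String.toList

-- has_x_neighbor(y, x) from Source B (four guarded probes)
def pvHasXNbr (g : List (List Char)) (y x : Nat) : Bool :=
  (decide (0 < x) && ((g.getD y []).getD (x - 1) ' ' == 'X'))
  || (decide (x + 1 < (g.getD y []).length) && ((g.getD y []).getD (x + 1) ' ' == 'X'))
  || (decide (0 < y) && decide (x < (g.getD (y - 1) []).length) && ((g.getD (y - 1) []).getD x ' ' == 'X'))
  || (decide (y + 1 < g.length) && decide (x < (g.getD (y + 1) []).length) && ((g.getD (y + 1) []).getD x ' ' == 'X'))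

-- the synchronous rebuild: new_rows = [[… for x, c in enumerate(row)] for y, row in enumerate(rows)]
def pvStepB (g : List (List Char)) : List (List Char) :=
  g.mapIdx (fun y row => row.mapIdx (fun x c =>
    if c ≠ '#' ∧ c ≠ 'X' ∧ pvHasXNbr g y x then 'X' else c))

-- 'while steps < d: … if new_rows == rows: break'
def pvLoopB : Nat → List (List Char) → List (List Char)
  | 0, g => g
  | n + 1, g =>
    let g' := pvStepB g
    if g' = g then g else pvLoopB n g'

def spread_d_alt (d : Int) (grid : List String) : List String :=
  (pvLoopB d.toNat (pvRowsB grid)).map (fun row => String.ofList row)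

-- ===== PRECONDITION & SPEC =====
def Spec_spread_d (d : Int) (grid : List String) (out : List String) : Prop := out = spread_d_alt d grid
instance (d : Int) (grid : List String) (out : List String) : Decidable (Spec_spread_d d grid out) := by unfold Spec_spread_d; infer_instance

-- ===== CLAIM (what is proved, stated in full; the proofs are below) =====
def Claim_equal_spread_d : Prop := ∀ (d : Int) (grid : List String), Dom_spread_d d grid → Spec_spread_d d grid (spread_d d grid)

-- ===== LEMMAS AND PROOFS =====

-- the cell of g at integer row y, column x (none = out of bounds)
def pvCellI (g : List (List Char)) (y x : Int) : Option Char :=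
  if 0 ≤ y ∧ y < (g.length : Int) ∧ 0 ≤ x ∧ x < ((g.getD y.toNat []).length : Int)
  then some ((g.getD y.toNat []).getD x.toNat ' ') else none

def pvIsX (g : List (List Char)) (y x : Int) : Prop := pvCellI g y x = some 'X'

def pvFree (g : List (List Char)) (y x : Int) : Prop :=
  ∃ c, pvCellI g y x = some c ∧ c ≠ '#' ∧ c ≠ 'X'

-- (x, y) is one of the four lateral neighbours of (x0, y0)
def pvAdj (x0 y0 x y : Int) : Prop :=
  (y = y0 ∧ (x = x0 - 1 ∨ x = x0 + 1)) ∨ (x = x0 ∧ (y = y0 - 1 ∨ y = y0 + 1))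

-- (y, x) has an 'X' neighbour in g
def pvXAdj (g : List (List Char)) (y x : Int) : Prop :=
  ∃ p : Int × Int, pvIsX g p.2 p.1 ∧ pvAdj p.1 p.2 x y

-- (y, x) is adjacent to some member of s
def pvAdjS (s : List (Int × Int)) (y x : Int) : Prop := ∃ a ∈ s, pvAdj a.1 a.2 x y

-- "g'/acc' arise from g/acc by marking exactly the free cells satisfying P"
def pvMS (g : List (List Char)) (acc : PySem.Set (Int × Int))
    (g' : List (List Char)) (acc' : PySem.Set (Int × Int)) (P : Int → Int → Prop) : Prop :=
  g'.map List.length = g.map List.length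
  ∧ (∀ y x, pvFree g y x → P y x → pvCellI g' y x = some 'X')
  ∧ (∀ y x, ¬ (pvFree g y x ∧ P y x) → pvCellI g' y x = pvCellI g y x)
  ∧ (∀ q : Int × Int, q ∈ acc' ↔ q ∈ acc ∨ (pvFree g q.2 q.1 ∧ P q.2 q.1))

lemma pvFree_not_isX {g y x} (h : pvFree g y x) : ¬ pvIsX g y x := by
  obtain ⟨c, hc, _, hX⟩ := h
  intro h'; rw [pvIsX, hc] at h'; exact hX (Option.some.injEq _ _ ▸ h'.symm ▸ rfl)

lemma pvMS_free {g acc g' acc' P} (h : pvMS g acc g' acc' P) (y x : Int) :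
    pvFree g' y x ↔ (pvFree g y x ∧ ¬ P y x) := by
  obtain ⟨-, hmark, hkeep, -⟩ := h
  by_cases hp : pvFree g y x ∧ P y x
  · have hcell := hmark y x hp.1 hp.2
    constructor
    · rintro ⟨c, hc, -, hX⟩
      rw [hcell] at hc
      exact absurd (Option.some.inj hc).symm hX
    · rintro ⟨-, hnp⟩
      exact absurd hp.2 hnp
  · have hcell := hkeep y x hp
    unfold pvFree
    rw [hcell]
    exact ⟨fun hf => ⟨hf, fun hP => hp ⟨hf, hP⟩⟩, fun h => h.1⟩

lemma pvMS_isX {g acc g' acc' P} (h : pvMS g acc g' acc' P) (y x : Int) :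
    pvIsX g' y x ↔ (pvIsX g y x ∨ (pvFree g y x ∧ P y x)) := by
  obtain ⟨-, hmark, hkeep, -⟩ := h
  by_cases hp : pvFree g y x ∧ P y x
  · have hcell := hmark y x hp.1 hp.2
    constructor
    · intro _; exact Or.inr hp
    · intro _; exact hcell
  · have hcell := hkeep y x hp
    unfold pvIsX
    rw [hcell]
    constructor
    · exact Or.inl
    · rintro (h | hfp)
      · exact h
      · exact absurd hfp hp

lemma pvMS_refl (g : List (List Char)) (acc : PySem.Set (Int × Int)) :
    pvMS g acc g acc (fun _ _ => False) := by
  refine ⟨rfl, by simp, by simp, by simp⟩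

lemma pvMS_congr {g acc g' acc' P Q} (h : pvMS g acc g' acc' P)
    (hpq : ∀ y x, P y x ↔ Q y x) : pvMS g acc g' acc' Q := by
  obtain ⟨h1, h2, h3, h4⟩ := h
  exact ⟨h1, fun y x hf hq => h2 y x hf ((hpq y x).mpr hq),
    fun y x hn => h3 y x (fun ⟨hf, hp⟩ => hn ⟨hf, (hpq y x).mp hp⟩),
    fun q => (h4 q).trans (by rw [hpq q.2 q.1])⟩

lemma pvMS_comp {g acc g1 acc1 g2 acc2 P Q}
    (h1 : pvMS g acc g1 acc1 P) (h2 : pvMS g1 acc1 g2 acc2 Q) :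
    pvMS g acc g2 acc2 (fun y x => P y x ∨ Q y x) := by
  have hfree1 : ∀ y x, pvFree g1 y x ↔ (pvFree g y x ∧ ¬ P y x) := pvMS_free h1
  obtain ⟨hs1, hm1, hk1, ha1⟩ := h1
  obtain ⟨hs2, hm2, hk2, ha2⟩ := h2
  refine ⟨hs2.trans hs1, ?_, ?_, ?_⟩
  · intro y x hf hpq
    by_cases hP : P y x
    · have h1c := hm1 y x hf hP
      have hnq : ¬ (pvFree g1 y x ∧ Q y x) := fun hh => ((hfree1 y x).mp hh.1).2 hP
      rw [hk2 y x hnq, h1c]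
    · rcases hpq with hP' | hQ
      · exact absurd hP' hP
      · have hf1 : pvFree g1 y x := (hfree1 y x).mpr ⟨hf, hP⟩
        exact hm2 y x hf1 hQ
  · intro y x hn
    have hnP : ¬ (pvFree g y x ∧ P y x) := fun hh => hn ⟨hh.1, Or.inl hh.2⟩
    have hnQ : ¬ (pvFree g1 y x ∧ Q y x) :=
      fun hh => hn ⟨((hfree1 y x).mp hh.1).1, Or.inr hh.2⟩
    rw [hk2 y x hnQ, hk1 y x hnP]
  · intro q
    rw [ha2 q, ha1 q, hfree1 q.2 q.1]
    constructor
    · rintro ((h | ⟨hf, hp⟩) | ⟨⟨hf, -⟩, hq⟩)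
      · exact Or.inl h
      · exact Or.inr ⟨hf, Or.inl hp⟩
      · exact Or.inr ⟨hf, Or.inr hq⟩
    · rintro (h | ⟨hf, hp | hq⟩)
      · exact Or.inl (Or.inl h)
      · exact Or.inl (Or.inr ⟨hf, hp⟩)
      · by_cases hP : P q.2 q.1
        · exact Or.inl (Or.inr ⟨hf, hP⟩)
        · exact Or.inr ⟨⟨hf, hP⟩, hq⟩

lemma pvGetD_set {α : Type} (l : List α) (n : Nat) (a : α) (m : Nat) (d : α) :
    (l.set n a).getD m d = if m = n ∧ n < l.length then a else l.getD m d := by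
  simp only [List.getD_eq_getElem?_getD, List.getElem?_set]
  split_ifs <;> simp_all

lemma pvCellI_set (g : List (List Char)) (p : Int × Int) (h1 : 0 ≤ p.2)
    (h2 : p.2 < (g.length : Int)) (h3 : 0 ≤ p.1)
    (h4 : p.1 < ((g.getD p.2.toNat []).length : Int)) (y x : Int) :
    pvCellI (g.set p.2.toNat ((g.getD p.2.toNat []).set p.1.toNat 'X')) y x
      = if y = p.2 ∧ x = p.1 then some 'X' else pvCellI g y x := by
  have hn : p.2.toNat < g.length := by omega
  have hm : p.1.toNat < (g.getD p.2.toNat []).length := by omega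
  have hrow : ∀ m : Nat, (g.set p.2.toNat ((g.getD p.2.toNat []).set p.1.toNat 'X')).getD m []
      = if m = p.2.toNat then (g.getD p.2.toNat []).set p.1.toNat 'X' else g.getD m [] := by
    intro m
    rw [pvGetD_set]
    by_cases h : m = p.2.toNat <;> simp [h, hn]
  have hlen : ∀ m : Nat, ((if m = p.2.toNat then (g.getD p.2.toNat []).set p.1.toNat 'X'
      else g.getD m []) : List Char).length = (g.getD m []).length := by
    intro m
    split_ifs with h
    · rw [List.length_set, h]
    · rfl
  unfold pvCellI
  rw [List.length_set, hrow y.toNat, hlen y.toNat]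
  split_ifs
  · rename_i hC hY hE
    obtain ⟨rfl, rfl⟩ := hE
    rw [pvGetD_set, if_pos ⟨rfl, hm⟩]
  · rename_i hC hY hE
    have hxx : x.toNat ≠ p.1.toNat := by
      have hyy : y = p.2 := by omega
      have hxne : x ≠ p.1 := fun h => hE ⟨hyy, h⟩
      omega
    rw [pvGetD_set, if_neg (by tauto), hY]
  · rename_i hC hY hE
    obtain ⟨rfl, rfl⟩ := hE
    exact absurd rfl hY
  · rfl
  · rename_i hC hE
    obtain ⟨rfl, rfl⟩ := hE
    exact absurd ⟨h1, h2, h3, h4⟩ hC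
  · rfl

lemma pvMS_procNbr (st : List (List Char) × PySem.Set (Int × Int)) (p : Int × Int) :
    pvMS st.1 st.2 (pvProcNbr st p).1 (pvProcNbr st p).2 (fun y x => y = p.2 ∧ x = p.1) := by
  unfold pvProcNbr
  split_ifs with hg
  · obtain ⟨h1, h2, h3, h4, h5, h6⟩ := hg
    have hfree : pvFree st.1 p.2 p.1 :=
      ⟨_, by unfold pvCellI; rw [if_pos ⟨h1, h2, h3, h4⟩], h5, h6⟩
    have hcell := pvCellI_set st.1 p h1 h2 h3 h4
    refine ⟨?_, ?_, ?_, ?_⟩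
    · rw [List.map_set]
      have hn : p.2.toNat < st.1.length := by omega
      have hel : ((st.1.getD p.2.toNat []).set p.1.toNat 'X').length
          = (st.1.map List.length)[p.2.toNat]'(by simpa using hn) := by
        rw [List.length_set, List.getElem_map, List.getD_eq_getElem _ _ hn]
      rw [hel, List.set_getElem_self]
    · rintro y x - ⟨rfl, rfl⟩
      rw [hcell, if_pos ⟨rfl, rfl⟩]
    · intro y x hkeepn
      have hne : ¬ (y = p.2 ∧ x = p.1) := by
        rintro ⟨rfl, rfl⟩
        exact hkeepn ⟨hfree, rfl, rfl⟩
      rw [hcell, if_neg hne]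
    · intro q
      rw [PySem.Set.mem_add]
      constructor
      · rintro (hq | rfl)
        · exact Or.inl hq
        · exact Or.inr ⟨hfree, rfl, rfl⟩
      · rintro (hq | ⟨-, h7, h8⟩)
        · exact Or.inl hq
        · exact Or.inr (Prod.ext h8 h7)
  · have hnfree : ¬ pvFree st.1 p.2 p.1 := by
      rintro ⟨c, hc, hc1, hc2⟩
      unfold pvCellI at hc
      split_ifs at hc with hb
      · obtain ⟨b1, b2, b3, b4⟩ := hb
        cases Option.some.inj hc
        exact hg ⟨b1, b2, b3, b4, hc1, hc2⟩
    refine ⟨rfl, ?_, fun _ _ _ => rfl, ?_⟩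
    · rintro y x hf ⟨rfl, rfl⟩
      exact absurd hf hnfree
    · intro q
      constructor
      · exact Or.inl
      · rintro (hq | ⟨hf, h7, h8⟩)
        · exact hq
        · rw [h7, h8] at hf
          exact absurd hf hnfree

lemma pvMS_nbrs (st : List (List Char) × PySem.Set (Int × Int)) (a : Int × Int) :
    pvMS st.1 st.2
      ([(a.1 - 1, a.2), (a.1 + 1, a.2), (a.1, a.2 - 1), (a.1, a.2 + 1)].foldl pvProcNbr st).1
      ([(a.1 - 1, a.2), (a.1 + 1, a.2), (a.1, a.2 - 1), (a.1, a.2 + 1)].foldl pvProcNbr st).2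
      (fun y x => pvAdj a.1 a.2 x y) := by
  simp only [List.foldl_cons, List.foldl_nil]
  have h1 := pvMS_procNbr st (a.1 - 1, a.2)
  have h2 := pvMS_procNbr (pvProcNbr st (a.1 - 1, a.2)) (a.1 + 1, a.2)
  have h3 := pvMS_procNbr (pvProcNbr (pvProcNbr st (a.1 - 1, a.2)) (a.1 + 1, a.2)) (a.1, a.2 - 1)
  have h4 := pvMS_procNbr (pvProcNbr (pvProcNbr (pvProcNbr st (a.1 - 1, a.2)) (a.1 + 1, a.2))
    (a.1, a.2 - 1)) (a.1, a.2 + 1)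
  refine pvMS_congr (pvMS_comp (pvMS_comp (pvMS_comp h1 h2) h3) h4) ?_
  intro y x
  unfold pvAdj
  simp only []
  tauto

lemma pvMS_stepA (s : List (Int × Int)) (g : List (List Char)) :
    pvMS g PySem.Set.empty (pvStepA g s).1 (pvStepA g s).2 (pvAdjS s) := by
  have key : ∀ (t : List (Int × Int)) (st : List (List Char) × PySem.Set (Int × Int)),
      pvMS st.1 st.2
        (t.foldl (fun st a =>
          [(a.1 - 1, a.2), (a.1 + 1, a.2), (a.1, a.2 - 1), (a.1, a.2 + 1)].foldl pvProcNbr st) st).1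
        (t.foldl (fun st a =>
          [(a.1 - 1, a.2), (a.1 + 1, a.2), (a.1, a.2 - 1), (a.1, a.2 + 1)].foldl pvProcNbr st) st).2
        (pvAdjS t) := by
    intro t
    induction t with
    | nil =>
      intro st
      refine pvMS_congr (pvMS_refl st.1 st.2) ?_
      intro y x
      simp [pvAdjS]
    | cons a t ih =>
      intro st
      rw [List.foldl_cons]
      refine pvMS_congr (pvMS_comp (pvMS_nbrs st a)
        (ih ([(a.1 - 1, a.2), (a.1 + 1, a.2), (a.1, a.2 - 1), (a.1, a.2 + 1)].foldl pvProcNbr st))) ?_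
      intro y x
      simp only [pvAdjS, List.mem_cons]
      constructor
      · rintro (h | ⟨b, hb, hadj⟩)
        · exact ⟨a, Or.inl rfl, h⟩
        · exact ⟨b, Or.inr hb, hadj⟩
      · rintro ⟨b, (rfl | hb), hadj⟩
        · exact Or.inl hadj
        · exact Or.inr ⟨b, hb, hadj⟩
  exact key s (g, PySem.Set.empty)

lemma pvCellI_bounds {g : List (List Char)} {y x : Int} {c : Char}
    (h : pvCellI g y x = some c) :
    0 ≤ y ∧ y < (g.length : Int) ∧ 0 ≤ x ∧ x < ((g.getD y.toNat []).length : Int) := by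
  unfold pvCellI at h
  split_ifs at h with hb
  exact hb

lemma pvXAdj_iff (g : List (List Char)) (y x : Int) :
    pvXAdj g y x ↔ pvIsX g y (x - 1) ∨ pvIsX g y (x + 1) ∨ pvIsX g (y - 1) x ∨ pvIsX g (y + 1) x := by
  constructor
  · rintro ⟨⟨px, py⟩, hX, hadj⟩
    unfold pvAdj at hadj
    simp only at hX hadj
    rcases hadj with ⟨hy, hx | hx⟩ | ⟨hx, hy | hy⟩
    · exact Or.inr (Or.inl (by rw [hy, show x + 1 = px from by omega]; exact hX))
    · exact Or.inl (by rw [hy, show x - 1 = px from by omega]; exact hX)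
    · exact Or.inr (Or.inr (Or.inr (by rw [hx, show y + 1 = py from by omega]; exact hX)))
    · exact Or.inr (Or.inr (Or.inl (by rw [hx, show y - 1 = py from by omega]; exact hX)))
  · rintro (h | h | h | h)
    · exact ⟨(x - 1, y), h, Or.inl ⟨rfl, Or.inr (show x = x - 1 + 1 by omega)⟩⟩
    · exact ⟨(x + 1, y), h, Or.inl ⟨rfl, Or.inl (show x = x + 1 - 1 by omega)⟩⟩
    · exact ⟨(x, y - 1), h, Or.inr ⟨rfl, Or.inr (show y = y - 1 + 1 by omega)⟩⟩
    · exact ⟨(x, y + 1), h, Or.inr ⟨rfl, Or.inl (show y = y + 1 - 1 by omega)⟩⟩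

-- B's neighbour probe agrees with pvXAdj at in-bounds cells
set_option maxHeartbeats 1000000 in
lemma pvHasXNbr_iff {g : List (List Char)} {y x : Int} (hy0 : 0 ≤ y)
    (hy : y < (g.length : Int)) (hx0 : 0 ≤ x)
    (hx : x < ((g.getD y.toNat []).length : Int)) :
    pvHasXNbr g y.toNat x.toNat = true ↔ pvXAdj g y x := by
  have e1 : (0 < x.toNat ∧ (g.getD y.toNat []).getD (x.toNat - 1) ' ' = 'X') ↔ pvIsX g y (x - 1) := by
    unfold pvIsX pvCellI
    constructor
    · rintro ⟨h5, h6⟩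
      rw [if_pos ⟨hy0, hy, by omega, by omega⟩, show (x - 1).toNat = x.toNat - 1 from by omega, h6]
    · intro h
      split_ifs at h with hb
      exact ⟨by omega, by rw [show x.toNat - 1 = (x - 1).toNat from by omega]; exact Option.some.inj h⟩
  have e2 : (x.toNat + 1 < (g.getD y.toNat []).length ∧ (g.getD y.toNat []).getD (x.toNat + 1) ' ' = 'X')
      ↔ pvIsX g y (x + 1) := by
    unfold pvIsX pvCellI
    constructor
    · rintro ⟨h5, h6⟩
      rw [if_pos ⟨hy0, hy, by omega, by omega⟩, show (x + 1).toNat = x.toNat + 1 from by omega, h6]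
    · intro h
      split_ifs at h with hb
      exact ⟨by omega, by rw [show x.toNat + 1 = (x + 1).toNat from by omega]; exact Option.some.inj h⟩
  have e3 : (0 < y.toNat ∧ x.toNat < (g.getD (y.toNat - 1) []).length
        ∧ (g.getD (y.toNat - 1) []).getD x.toNat ' ' = 'X') ↔ pvIsX g (y - 1) x := by
    unfold pvIsX pvCellI
    rw [show (y - 1).toNat = y.toNat - 1 from by omega]
    constructor
    · rintro ⟨h5, h6, h7⟩
      rw [if_pos ⟨by omega, by omega, hx0, by omega⟩, h7]
    · intro h
      split_ifs at h with hb
      exact ⟨by omega, by omega, Option.some.inj h⟩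
  have e4 : (y.toNat + 1 < g.length ∧ x.toNat < (g.getD (y.toNat + 1) []).length
        ∧ (g.getD (y.toNat + 1) []).getD x.toNat ' ' = 'X') ↔ pvIsX g (y + 1) x := by
    unfold pvIsX pvCellI
    rw [show (y + 1).toNat = y.toNat + 1 from by omega]
    constructor
    · rintro ⟨h5, h6, h7⟩
      rw [if_pos ⟨by omega, by omega, hx0, by omega⟩, h7]
    · intro h
      split_ifs at h with hb
      exact ⟨by omega, by omega, Option.some.inj h⟩
  rw [pvXAdj_iff]
  unfold pvHasXNbr
  simp only [Bool.or_eq_true, Bool.and_eq_true, decide_eq_true_eq, beq_iff_eq]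
  constructor
  · rintro (((h | h) | h) | h)
    · exact Or.inl (e1.mp h)
    · exact Or.inr (Or.inl (e2.mp h))
    · exact Or.inr (Or.inr (Or.inl (e3.mp ⟨h.1.1, h.1.2, h.2⟩)))
    · exact Or.inr (Or.inr (Or.inr (e4.mp ⟨h.1.1, h.1.2, h.2⟩)))
  · rintro (h | h | h | h)
    · exact Or.inl (Or.inl (Or.inl (e1.mpr h)))
    · exact Or.inl (Or.inl (Or.inr (e2.mpr h)))
    · obtain ⟨h5, h6, h7⟩ := e3.mpr h
      exact Or.inl (Or.inr ⟨⟨h5, h6⟩, h7⟩)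
    · obtain ⟨h5, h6, h7⟩ := e4.mpr h
      exact Or.inr ⟨⟨h5, h6⟩, h7⟩

lemma pvRowLen_stepB (g : List (List Char)) (m : Nat) :
    ((pvStepB g).getD m []).length = (g.getD m []).length := by
  by_cases h : m < g.length
  · rw [List.getD_eq_getElem _ _ (by simpa [pvStepB] using h), List.getD_eq_getElem _ _ h]
    simp [pvStepB, List.getElem_mapIdx]
  · rw [List.getD_eq_default _ _ (by simpa [pvStepB] using h), List.getD_eq_default _ _ (by omega)]

lemma pvStepB_shape (g : List (List Char)) :
    (pvStepB g).map List.length = g.map List.length := by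
  apply List.ext_getElem (by simp [pvStepB])
  intro i h1 h2
  simp [pvStepB, List.getElem_mapIdx]

lemma pvCellI_stepB (g : List (List Char)) (y x : Int) :
    pvCellI (pvStepB g) y x = (pvCellI g y x).map (fun c =>
      if c ≠ '#' ∧ c ≠ 'X' ∧ pvHasXNbr g y.toNat x.toNat then 'X' else c) := by
  unfold pvCellI
  have hL : (pvStepB g).length = g.length := by simp [pvStepB]
  rw [hL, pvRowLen_stepB]
  by_cases hb : 0 ≤ y ∧ y < (g.length : Int) ∧ 0 ≤ x ∧ x < ((g.getD y.toNat []).length : Int)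
  · rw [if_pos hb, if_pos hb]
    obtain ⟨b1, b2, b3, b4⟩ := hb
    have hy : y.toNat < g.length := by omega
    have hx : x.toNat < (g.getD y.toNat []).length := by omega
    have hrow : (pvStepB g).getD y.toNat [] = (g.getD y.toNat []).mapIdx
        (fun x c => if c ≠ '#' ∧ c ≠ 'X' ∧ pvHasXNbr g y.toNat x then 'X' else c) := by
      rw [List.getD_eq_getElem _ _ (by simpa [pvStepB] using hy),
        List.getD_eq_getElem _ _ hy]
      simp [pvStepB, List.getElem_mapIdx]
    rw [hrow, List.getD_eq_getElem _ _ (by simpa using hx), List.getElem_mapIdx,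
      List.getD_eq_getElem _ _ hx, Option.map_some]
  · rw [if_neg hb, if_neg hb, Option.map_none]

lemma pvStepB_mark {g : List (List Char)} {y x : Int}
    (hf : pvFree g y x) (ha : pvXAdj g y x) : pvCellI (pvStepB g) y x = some 'X' := by
  obtain ⟨c, hc, h1, h2⟩ := hf
  obtain ⟨b1, b2, b3, b4⟩ := pvCellI_bounds hc
  rw [pvCellI_stepB, hc, Option.map_some, if_pos ⟨h1, h2, (pvHasXNbr_iff b1 b2 b3 b4).mpr ha⟩]

lemma pvStepB_keep {g : List (List Char)} {y x : Int}
    (h : ¬ (pvFree g y x ∧ pvXAdj g y x)) : pvCellI (pvStepB g) y x = pvCellI g y x := by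
  rw [pvCellI_stepB]
  cases hcell : pvCellI g y x with
  | none => rfl
  | some c =>
    obtain ⟨b1, b2, b3, b4⟩ := pvCellI_bounds hcell
    rw [Option.map_some]
    by_cases h1 : c ≠ '#' ∧ c ≠ 'X' ∧ pvHasXNbr g y.toNat x.toNat
    · exact absurd ⟨⟨c, hcell, h1.1, h1.2.1⟩, (pvHasXNbr_iff b1 b2 b3 b4).mp h1.2.2⟩ h
    · rw [if_neg h1]

lemma pvGridExt {g1 g2 : List (List Char)} (hs : g1.map List.length = g2.map List.length)
    (hc : ∀ y x : Int, pvCellI g1 y x = pvCellI g2 y x) : g1 = g2 := by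
  have hlen : g1.length = g2.length := by
    have h := congrArg List.length hs
    simpa using h
  apply List.ext_getElem hlen
  intro i hi1 hi2
  have hrl : (g1[i]'hi1).length = (g2[i]'hi2).length := by
    have h := List.getElem_of_eq hs (by simpa using hi1)
    simpa using h
  apply List.ext_getElem hrl
  intro j hj1 hj2
  have e1 : pvCellI g1 (↑i) (↑j) = some ((g1[i]'hi1)[j]'hj1) := by
    unfold pvCellI
    simp only [Int.toNat_natCast]
    rw [if_pos ⟨Int.natCast_nonneg i, by exact_mod_cast hi1, Int.natCast_nonneg j,
      by rw [List.getD_eq_getElem _ _ hi1]; exact_mod_cast hj1⟩]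
    rw [List.getD_eq_getElem _ _ hi1, List.getD_eq_getElem _ _ hj1]
  have e2 : pvCellI g2 (↑i) (↑j) = some ((g2[i]'hi2)[j]'hj2) := by
    unfold pvCellI
    simp only [Int.toNat_natCast]
    rw [if_pos ⟨Int.natCast_nonneg i, by exact_mod_cast hi2, Int.natCast_nonneg j,
      by rw [List.getD_eq_getElem _ _ hi2]; exact_mod_cast hj2⟩]
    rw [List.getD_eq_getElem _ _ hi2, List.getD_eq_getElem _ _ hj2]
  have h := hc ↑i ↑j
  rw [e1, e2] at h
  exact Option.some.inj h

-- invariant: members of s are 'X', and every 'X' cell outside s has no free neighbour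
def pvInv (g : List (List Char)) (s : List (Int × Int)) : Prop :=
  (∀ q ∈ s, pvIsX g q.2 q.1) ∧
  (∀ q : Int × Int, pvIsX g q.2 q.1 → q ∉ s → ∀ y x, pvAdj q.1 q.2 x y → ¬ pvFree g y x)

lemma pvMaskEq {g s} (h : pvInv g s) {y x : Int} (hf : pvFree g y x) :
    pvAdjS s y x ↔ pvXAdj g y x := by
  constructor
  · rintro ⟨a, ha, hadj⟩; exact ⟨a, h.1 a ha, hadj⟩
  · rintro ⟨p, hX, hadj⟩
    by_cases hp : p ∈ s
    · exact ⟨p, hp, hadj⟩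
    · exact absurd hf (h.2 p hX hp y x hadj)

lemma pvStep_eq {g s} (h : pvInv g s) : (pvStepA g s).1 = pvStepB g := by
  obtain ⟨hsh, hmark, hkeep, hacc⟩ := pvMS_stepA s g
  apply pvGridExt (hsh.trans (pvStepB_shape g).symm)
  intro y x
  by_cases hf : pvFree g y x
  · by_cases ha : pvAdjS s y x
    · rw [hmark y x hf ha, pvStepB_mark hf ((pvMaskEq h hf).mp ha)]
    · have hx : ¬ pvXAdj g y x := fun hxa => ha ((pvMaskEq h hf).mpr hxa)
      rw [hkeep y x (fun hh => ha hh.2), pvStepB_keep (fun hh => hx hh.2)]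
  · rw [hkeep y x (fun hh => hf hh.1), pvStepB_keep (fun hh => hf hh.1)]

lemma pvInv_step {g s} (h : pvInv g s) : pvInv (pvStepA g s).1 (pvStepA g s).2 := by
  have hms := pvMS_stepA s g
  have hisX := fun y x => pvMS_isX hms y x
  have hfree := fun y x => pvMS_free hms y x
  have hmem : ∀ q : Int × Int, q ∈ (pvStepA g s).2 ↔ (pvFree g q.2 q.1 ∧ pvAdjS s q.2 q.1) := by
    intro q
    rw [hms.2.2.2 q]
    simp [PySem.Set.empty]
  constructor
  · intro q hq
    exact (hisX q.2 q.1).mpr (Or.inr ((hmem q).mp hq))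
  · intro q hX hq y x hadj hf'
    have hfgx : pvFree g y x ∧ ¬ pvAdjS s y x := (hfree y x).mp hf'
    rcases (hisX q.2 q.1).mp hX with hXg | hmarked
    · by_cases hqs : q ∈ s
      · exact hfgx.2 ⟨q, hqs, hadj⟩
      · exact (h.2 q hXg hqs y x hadj) hfgx.1
    · exact hq ((hmem q).mpr hmarked)

lemma pvEmpty_iff (g : List (List Char)) (s : List (Int × Int)) :
    (pvStepA g s).2 = [] ↔ (pvStepA g s).1 = g := by
  obtain ⟨hsh, hmark, hkeep, hacc⟩ := pvMS_stepA s g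
  have hmem : ∀ q : Int × Int, q ∈ (pvStepA g s).2 ↔ (pvFree g q.2 q.1 ∧ pvAdjS s q.2 q.1) := by
    intro q
    rw [hacc q]
    simp [PySem.Set.empty]
  constructor
  · intro hnil
    apply pvGridExt hsh
    intro y x
    apply hkeep
    rintro ⟨hf, ha⟩
    have hqmem : (x, y) ∈ (pvStepA g s).2 := (hmem (x, y)).mpr ⟨hf, ha⟩
    rw [hnil] at hqmem
    cases hqmem
  · intro heq
    rw [List.eq_nil_iff_forall_not_mem]
    intro q hq
    obtain ⟨hf, ha⟩ := (hmem q).mp hq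
    have hX : pvCellI (pvStepA g s).1 q.2 q.1 = some 'X' := hmark q.2 q.1 hf ha
    rw [heq] at hX
    exact pvFree_not_isX hf hX

lemma pvLoop_eq : ∀ (n : Nat) (g : List (List Char)) (s : PySem.Set (Int × Int)),
    pvInv g s → pvLoopA n g s = pvLoopB n g := by
  intro n
  induction n with
  | zero => intro g s _; rfl
  | succ n ih =>
    intro g s hinv
    have hstep := pvStep_eq hinv
    show (if (pvStepA g s).2 = [] then (pvStepA g s).1 else pvLoopA n (pvStepA g s).1 (pvStepA g s).2)
      = (if pvStepB g = g then g else pvLoopB n (pvStepB g))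
    by_cases hnil : (pvStepA g s).2 = []
    · have hgg : (pvStepA g s).1 = g := (pvEmpty_iff g s).mp hnil
      have hB : pvStepB g = g := by rw [← hstep]; exact hgg
      rw [if_pos hnil, if_pos hB, hgg]
    · have hgg : (pvStepA g s).1 ≠ g := fun he => hnil ((pvEmpty_iff g s).mpr he)
      have hB : pvStepB g ≠ g := by rw [← hstep]; exact hgg
      rw [if_neg hnil, if_neg hB, ih _ _ (pvInv_step hinv), hstep]

lemma pvMem_initSculk (g : List (List Char)) (q : Int × Int) :
    q ∈ pvInitSculk g ↔ pvIsX g q.2 q.1 := by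
  obtain ⟨q1, q2⟩ := q
  have inner : ∀ (yv : Nat) (l : List Nat) (s0 : PySem.Set (Int × Int)),
      (q1, q2) ∈ l.foldl (fun s x =>
          if (g.getD yv []).getD x ' ' = 'X' then PySem.Set.add s ((x : Int), (yv : Int)) else s) s0 ↔
        (q1, q2) ∈ s0 ∨ ∃ x ∈ l, (g.getD yv []).getD x ' ' = 'X' ∧ (q1, q2) = ((x : Int), (yv : Int)) := by
    intro yv l
    induction l with
    | nil => intro s0; simp
    | cons a t iht =>
      intro s0
      rw [List.foldl_cons]
      by_cases hca : (g.getD yv []).getD a ' ' = 'X'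
      · rw [if_pos hca, iht, PySem.Set.mem_add]
        constructor
        · rintro ((hq | hfa) | ⟨b, hb, hcb, hfb⟩)
          · exact Or.inl hq
          · exact Or.inr ⟨a, List.mem_cons_self .., hca, hfa⟩
          · exact Or.inr ⟨b, List.mem_cons_of_mem a hb, hcb, hfb⟩
        · rintro (hq | ⟨b, hb, hcb, hfb⟩)
          · exact Or.inl (Or.inl hq)
          · rcases List.mem_cons.mp hb with rfl | hb'
            · exact Or.inl (Or.inr hfb)
            · exact Or.inr ⟨b, hb', hcb, hfb⟩
      · rw [if_neg hca, iht]
        constructor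
        · rintro (hq | ⟨b, hb, hcb, hfb⟩)
          · exact Or.inl hq
          · exact Or.inr ⟨b, List.mem_cons_of_mem a hb, hcb, hfb⟩
        · rintro (hq | ⟨b, hb, hcb, hfb⟩)
          · exact Or.inl hq
          · rcases List.mem_cons.mp hb with rfl | hb'
            · exact absurd hcb hca
            · exact Or.inr ⟨b, hb', hcb, hfb⟩
  have outer : ∀ (l : List Nat) (s0 : PySem.Set (Int × Int)),
      (q1, q2) ∈ l.foldl (fun s y => (List.range (g.getD y []).length).foldl
          (fun s x => if (g.getD y []).getD x ' ' = 'X' then PySem.Set.add s ((x : Int), (y : Int)) else s) s) s0 ↔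
        (q1, q2) ∈ s0 ∨ ∃ y ∈ l, ∃ x ∈ List.range (g.getD y []).length,
          (g.getD y []).getD x ' ' = 'X' ∧ (q1, q2) = ((x : Int), (y : Int)) := by
    intro l
    induction l with
    | nil => intro s0; simp
    | cons a t iht =>
      intro s0
      rw [List.foldl_cons, iht, inner a]
      constructor
      · rintro ((hq | ⟨x, hx, hcx, hfx⟩) | ⟨y, hy, hrest⟩)
        · exact Or.inl hq
        · exact Or.inr ⟨a, List.mem_cons_self .., x, hx, hcx, hfx⟩
        · exact Or.inr ⟨y, List.mem_cons_of_mem a hy, hrest⟩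
      · rintro (hq | ⟨y, hy, hrest⟩)
        · exact Or.inl (Or.inl hq)
        · rcases List.mem_cons.mp hy with rfl | hy'
          · obtain ⟨x, hx, hcx, hfx⟩ := hrest
            exact Or.inl (Or.inr ⟨x, hx, hcx, hfx⟩)
          · exact Or.inr ⟨y, hy', hrest⟩
  unfold pvInitSculk
  rw [outer]
  simp only [PySem.Set.empty, List.not_mem_nil, false_or]
  constructor
  · rintro ⟨y, hy, x, hx, hX, hq⟩
    rw [List.mem_range] at hy hx
    cases hq
    unfold pvIsX pvCellI
    simp only [Int.toNat_natCast]
    rw [if_pos ⟨Int.natCast_nonneg y, by exact_mod_cast hy, Int.natCast_nonneg x,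
      by exact_mod_cast hx⟩, hX]
  · intro hX
    have hb := pvCellI_bounds hX
    refine ⟨q2.toNat, by rw [List.mem_range]; omega, q1.toNat, by rw [List.mem_range]; omega, ?_, ?_⟩
    · unfold pvIsX pvCellI at hX
      rw [if_pos hb] at hX
      exact Option.some.inj hX
    · have h1 : q1 = ((q1.toNat : Nat) : Int) := by omega
      have h2 : q2 = ((q2.toNat : Nat) : Int) := by omega
      exact Prod.ext h1 h2

lemma pvInv_init (g : List (List Char)) : pvInv g (pvInitSculk g) := by
  constructor
  · intro q hq; exact (pvMem_initSculk g q).mp hq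
  · intro q hX hq; exact absurd ((pvMem_initSculk g q).mpr hX) hq

-- ===== VERDICT (by name: the statement is the Claim_ definition above) =====
theorem spread_d_spec : Claim_equal_spread_d := by
  intro d grid _
  show spread_d d grid = spread_d_alt d grid
  unfold spread_d spread_d_alt
  rw [show pvRowsA grid = pvRowsB grid from rfl,
    pvLoop_eq d.toNat (pvRowsB grid) _ (pvInv_init _)]
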